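-- pv_equiv track=rewrite | github.com/Jeffresh/regex-engine | regex_engine.py | regex_engine
-- ===== SOURCE A (Python) =====
-- def my_regex(pattern, input_string):
--     return pattern == '' \
--            or (pattern == '.' and bool(input_string)) \
--            or (pattern == input_string)
--
-- def regex_engine(raw_input):
--     split_pattern = '|'
--     pattern, input_string = raw_input.split(split_pattern)
--     wildcard = None
--     if len(pattern) > 0:
--         wildcard = '^' if pattern[0] == '^' else None
--         pattern = pattern[1:] if wildcard else pattern
--     if engine(pattern, input_string):
--         return True
--     elif input_string and not wildcard:
--         return regex_engine(pattern + '|' + input_string[1:])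
--     else:
--         return False
--
-- def engine(pattern, input_string):
--     if not pattern:
--         return True
--     elif not input_string and pattern == '$':
--         return True
--     elif not input_string:
--         return False
--     else:
--         if my_regex(pattern[0], input_string[0]):
--             return engine(pattern[1:], input_string[1:])
--         elif pattern[0] == '?':
--             return engine(pattern[1:], input_string)
--         elif pattern[0] == '*' and (len(input_string)) == 1:
--             return engine(pattern[1:], input_string)
--         elif (pattern[0] == '*' or pattern[0] == '+') and (
--                 len(input_string) > 1 and input_string[0] == input_string[1]):
--             return engine(pattern, input_string[2:])
--         elif len(pattern) > 1 and (pattern[1] == '?' or pattern[1] == '*' or pattern[0] == '+'):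
--             return engine(pattern[2:], input_string)
--         else:
--             return False
-- ===== SOURCE B (Python) =====
-- def match_at(p, i, s, j):
--     # iterative, index-based version of the quirky matcher (no string slicing)
--     while True:
--         if i >= len(p):
--             return True
--         if j >= len(s):
--             return p[i:] == '$'
--         pc, sc = p[i], s[j]
--         if pc == '.' or pc == sc:
--             i += 1
--             j += 1
--         elif pc == '?':
--             i += 1
--         elif pc == '*' and j + 1 == len(s):
--             i += 1
--         elif pc in '*+' and j + 1 < len(s) and s[j] == s[j + 1]:
--             j += 2
--         elif i + 1 < len(p) and (p[i + 1] == '?' or p[i + 1] == '*' or pc == '+'):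
--             i += 2
--         else:
--             return False
--
-- def regex_engine(raw_input):
--     pattern, input_string = raw_input.split('|')
--     anchored = pattern.startswith('^')
--     if anchored:
--         pattern = pattern[1:]
--     tries = 1 if anchored else len(input_string) + 1
--     return any(match_at(pattern, 0, input_string, k) for k in range(tries))
-- ===== Notes on version B (the rewrite author's own statement) =====
-- stated objective: alternative
-- what changed: B replaces A's slice-and-recurse design entirely: instead of recursive engine() on string slices plus a self-recursion that rebuilds and re-splits the raw string for each retry, B uses one iterative index-based matcher (two cursors into fixed strings, a while loop, no slicing) and tries every start offset with any() over range(), stripping the anchor once.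
import Mathlib
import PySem

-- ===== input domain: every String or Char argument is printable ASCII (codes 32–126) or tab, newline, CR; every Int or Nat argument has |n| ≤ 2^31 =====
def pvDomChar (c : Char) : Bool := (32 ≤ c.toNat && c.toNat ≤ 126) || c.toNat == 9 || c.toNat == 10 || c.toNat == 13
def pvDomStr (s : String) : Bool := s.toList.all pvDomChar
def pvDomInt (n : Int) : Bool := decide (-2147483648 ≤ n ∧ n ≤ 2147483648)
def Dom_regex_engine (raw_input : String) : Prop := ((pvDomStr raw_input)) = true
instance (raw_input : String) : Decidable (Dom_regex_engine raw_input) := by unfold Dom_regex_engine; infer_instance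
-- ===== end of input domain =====

-- B replaces A's slice-and-recurse design (recursive engine on string slices plus a self-recursion
-- rebuilding the raw string) by an iterative index-based matcher tried at every start offset.

-- ===== PORT A =====
-- my_regex on single-character strings (its only call sites), exact: '' never equals a 1-char string
def myRegex (p s : Char) : Bool := (p = '.') || (p = s)

-- tiny termination lemmas cited by the ports' decreasing_by (keeps the definitions lean)
theorem edec1 (a b : Nat) : a + b < a + 1 + (b + 1) :=
  Nat.add_lt_add (Nat.lt_succ_self a) (Nat.lt_succ_self b)
theorem edec2 (a b : Nat) : a + (b + 1) < a + 1 + (b + 1) :=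
  Nat.add_lt_add_right (Nat.lt_succ_self a) (b + 1)
theorem edec4 (a b : Nat) : a + 1 + (b - 1) < a + 1 + (b + 1) :=
  Nat.add_lt_add_left (Nat.lt_succ_of_le (Nat.sub_le b 1)) (a + 1)
theorem edec5 (a b : Nat) : a - 1 + (b + 1) < a + 1 + (b + 1) :=
  Nat.add_lt_add_right (Nat.lt_succ_of_le (Nat.sub_le a 1)) (b + 1)
theorem mdec1 (a b i j : Nat) (h1 : ¬ a ≤ i) (h2 : ¬ b ≤ j) :
    a - (i + 1) + (b - (j + 1)) < a - i + (b - j) :=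
  Nat.add_lt_add_of_lt_of_le (Nat.sub_succ_lt_self a i (Nat.lt_of_not_le h1))
    (Nat.sub_le_sub_left (Nat.le_succ j) b)
theorem mdec2 (a b i j : Nat) (h1 : ¬ a ≤ i) (h2 : ¬ b ≤ j) :
    a - (i + 1) + (b - j) < a - i + (b - j) :=
  Nat.add_lt_add_right (Nat.sub_succ_lt_self a i (Nat.lt_of_not_le h1)) (b - j)
theorem mdec3 (a b i j : Nat) (h1 : ¬ a ≤ i) (h2 : ¬ b ≤ j) :
    a - i + (b - (j + 2)) < a - i + (b - j) :=
  Nat.add_lt_add_left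
    (Nat.sub_lt_sub_left (Nat.lt_of_not_le h2) (Nat.lt_succ_of_lt (Nat.lt_succ_self j))) (a - i)
theorem mdec4 (a b i j : Nat) (h1 : ¬ a ≤ i) (h2 : ¬ b ≤ j) :
    a - (i + 2) + (b - j) < a - i + (b - j) :=
  Nat.add_lt_add_right
    (Nat.sub_lt_sub_left (Nat.lt_of_not_le h1) (Nat.lt_succ_of_lt (Nat.lt_succ_self i))) (b - j)

-- A's recursive engine over string slices, ported over List Char, branch for branch
def engineA : List Char → List Char → Bool
  | [], _ => true
  | p, [] => decide (p = ['$'])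
  | p0 :: pr, s0 :: sr =>
    if myRegex p0 s0 then engineA pr sr
    else if p0 = '?' then engineA pr (s0 :: sr)
    else if p0 = '*' && sr.isEmpty then engineA pr (s0 :: sr)
    else if (p0 = '*' || p0 = '+') && (match sr with | s1 :: _ => s0 = s1 | [] => false) then
      engineA (p0 :: pr) (sr.drop 1)
    else if pr ≠ [] && (pr.head? = some '?' || pr.head? = some '*' || p0 = '+') then
      engineA (pr.drop 1) (s0 :: sr)
    else false
  termination_by p s => p.length + s.length
  decreasing_by
    all_goals simp only [List.length_cons, List.length_drop]
    all_goals first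
      | exact edec1 _ _
      | exact edec2 _ _
      | exact edec4 _ _
      | exact edec5 _ _

-- `pattern, input_string = raw_input.split('|')` succeeds iff raw has exactly one '|'; then
-- pattern = chars before the '|', input = chars after it (takeWhile/dropWhile, exact there).
def splitPat (raw : List Char) : List Char := raw.takeWhile (· ≠ '|')
def splitInp (raw : List Char) : List Char := (raw.dropWhile (· ≠ '|')).tail
-- A: wildcard is set iff pattern is nonempty and starts with '^'; pattern stripped iff wildcard
def anchOf (raw : List Char) : Bool := (splitPat raw).head? == some '^'
def patOf (raw : List Char) : List Char := if anchOf raw then (splitPat raw).tail else splitPat raw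

-- termination measure for A's self-recursion (the rebuilt raw string is one char shorter)
theorem regexA_dec (raw : List Char) (h : raw.count '|' = 1) (hne : splitInp raw ≠ []) :
    (splitPat raw ++ '|' :: (splitInp raw).tail).length < raw.length := by
  have h1 : (splitPat raw).length + (raw.dropWhile (· ≠ '|')).length = raw.length := by
    conv_rhs => rw [← List.takeWhile_append_dropWhile (p := (· ≠ '|')) (l := raw)]
    rw [List.length_append]; rfl
  unfold splitInp at hne ⊢
  cases hd : raw.dropWhile (· ≠ '|') with
  | nil => rw [hd] at hne; simp at hne
  | cons c rest =>
    rw [hd] at h1 hne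
    simp only [List.tail_cons] at hne ⊢
    cases rest with
    | nil => simp at hne
    | cons r rs => simp at h1 ⊢; omega

-- Where Python raises ValueError (count ≠ 1) the port returns false; Pre_ excludes those inputs.
def regexA (raw : List Char) : Bool :=
  if h : raw.count '|' = 1 then
    if engineA (patOf raw) (splitInp raw) then true
    else if splitInp raw ≠ [] && !anchOf raw then
      regexA (patOf raw ++ '|' :: (splitInp raw).tail)
    else false
  else false
  termination_by raw.length
  decreasing_by
    rename_i h1 h2
    simp only [Bool.and_eq_true, decide_eq_true_eq, Bool.not_eq_true'] at h2
    rw [patOf, if_neg (by rw [h2.2]; exact Bool.false_ne_true)]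
    exact regexA_dec raw h h2.1

def regex_engine (raw_input : String) : Bool := regexA raw_input.toList

-- ===== PORT B =====
-- B's iterative matcher: two cursors i, j into the fixed pattern/input, no slicing
def matchAt (p s : List Char) (i j : Nat) : Bool :=
  if h1 : p.length ≤ i then true
  else if h2 : s.length ≤ j then decide (p.drop i = ['$'])
  else if p[i]! = '.' ∨ p[i]! = s[j]! then matchAt p s (i + 1) (j + 1)
  else if p[i]! = '?' then matchAt p s (i + 1) j
  else if p[i]! = '*' ∧ j + 1 = s.length then matchAt p s (i + 1) j
  else if (p[i]! = '*' ∨ p[i]! = '+') ∧ j + 2 ≤ s.length ∧ s[j]! = s[j + 1]! then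
    matchAt p s i (j + 2)
  else if i + 2 ≤ p.length ∧ (p[i + 1]! = '?' ∨ p[i + 1]! = '*' ∨ p[i]! = '+') then
    matchAt p s (i + 2) j
  else false
  termination_by p.length - i + (s.length - j)
  decreasing_by
    all_goals first
      | exact mdec1 _ _ _ _ h1 h2
      | exact mdec2 _ _ _ _ h1 h2
      | exact mdec3 _ _ _ _ h1 h2
      | exact mdec4 _ _ _ _ h1 h2

-- pattern.startswith('^')
def anchB (p : List Char) : Bool := decide (p.take 1 = ['^'])

def regexB (raw : List Char) : Bool :=
  if raw.count '|' = 1 then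
    let pat0 := splitPat raw
    let inp := splitInp raw
    let pat := if anchB pat0 then pat0.drop 1 else pat0
    let tries := if anchB pat0 then 1 else inp.length + 1
    (List.range tries).any (fun k => matchAt pat inp 0 k)
  else false

def regex_engine_alt (raw_input : String) : Bool := regexB raw_input.toList

-- ===== PRECONDITION & SPEC =====
-- Pre_ excludes exactly the inputs that do not contain exactly one separator bar, on which A's
-- two-variable tuple unpacking of the split raises ValueError (B raises identically there).
def Pre_regex_engine (raw_input : String) : Prop := raw_input.toList.count '|' = 1
instance (raw_input : String) : Decidable (Pre_regex_engine raw_input) := by unfold Pre_regex_engine; infer_instance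
def pvWitness_regex_engine : String := "a.c|abc"

def Spec_regex_engine (raw_input : String) (out : Bool) : Prop := out = regex_engine_alt raw_input
instance (raw_input : String) (out : Bool) : Decidable (Spec_regex_engine raw_input out) := by unfold Spec_regex_engine; infer_instance

-- ===== CLAIM (what is proved, stated in full; the proofs are below) =====
def Claim_equal_regex_engine : Prop := ∀ (raw_input : String), Dom_regex_engine raw_input → Pre_regex_engine raw_input → Spec_regex_engine raw_input (regex_engine raw_input)

-- ===== LEMMAS AND PROOFS =====

-- proof-side helper: A's retry recursion seen as a loop over successive input suffixes
def loopB (pattern : List Char) (anchored : Bool) (input : List Char) : Bool :=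
  if engineA pattern input then true
  else if input ≠ [] && !anchored then loopB pattern anchored input.tail
  else false
  termination_by input.length
  decreasing_by
    rename_i h1 h2
    cases input with
    | nil => simp_all
    | cons c cs => simp

-- unfolding lemmas for the well-founded engineA
theorem engineA_nil (s : List Char) : engineA [] s = true := by
  rw [engineA.eq_def]

theorem engineA_cons_nil (c : Char) (pr : List Char) :
    engineA (c :: pr) [] = decide (c :: pr = ['$']) := by
  rw [engineA.eq_def]

theorem engineA_cons_cons (p0 s0 : Char) (pr sr : List Char) :
    engineA (p0 :: pr) (s0 :: sr) =
      (if myRegex p0 s0 then engineA pr sr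
       else if p0 = '?' then engineA pr (s0 :: sr)
       else if p0 = '*' && sr.isEmpty then engineA pr (s0 :: sr)
       else if (p0 = '*' || p0 = '+') && (match sr with | s1 :: _ => s0 = s1 | [] => false) then
         engineA (p0 :: pr) (sr.drop 1)
       else if pr ≠ [] && (pr.head? = some '?' || pr.head? = some '*' || p0 = '+') then
         engineA (pr.drop 1) (s0 :: sr)
       else false) := by
  rw [engineA.eq_def]

-- B's cursor-based matcher computes engineA on the corresponding suffixes
theorem matchAt_eq_aux (p s : List Char) (m : Nat) :
    ∀ i j, p.length - i + (s.length - j) ≤ m →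
      matchAt p s i j = engineA (p.drop i) (s.drop j) := by
  induction m with
  | zero =>
    intro i j hm
    have hip : p.length ≤ i := by omega
    rw [matchAt, dif_pos hip, List.drop_eq_nil_of_le hip, engineA_nil]
  | succ m ih =>
    intro i j hm
    rw [matchAt]
    by_cases h1 : p.length ≤ i
    · rw [dif_pos h1, List.drop_eq_nil_of_le h1, engineA_nil]
    rw [dif_neg h1]
    have hip : i < p.length := by omega
    have hdp : p.drop i = p[i] :: p.drop (i + 1) := (List.getElem_cons_drop hip).symm
    have hpe : p[i]! = p[i] := getElem!_pos p i hip
    by_cases h2 : s.length ≤ j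
    · rw [dif_pos h2, List.drop_eq_nil_of_le h2, hdp, engineA_cons_nil]
    rw [dif_neg h2]
    have hjs : j < s.length := by omega
    have hds : s.drop j = s[j] :: s.drop (j + 1) := (List.getElem_cons_drop hjs).symm
    have hse : s[j]! = s[j] := getElem!_pos s j hjs
    rw [hdp, hds, engineA_cons_cons, hpe, hse]
    by_cases c1 : p[i] = '.' ∨ p[i] = s[j]
    · have hmr : myRegex p[i] s[j] = true := by
        unfold myRegex
        rcases c1 with h | h <;> simp [h]
      rw [if_pos c1, if_pos hmr]
      exact ih (i + 1) (j + 1) (by omega)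
    have hmr : ¬ myRegex p[i] s[j] = true := by
      unfold myRegex
      simp only [Bool.or_eq_true, decide_eq_true_eq]
      exact c1
    rw [if_neg c1, if_neg hmr]
    by_cases c2 : p[i] = '?'
    · rw [if_pos c2, if_pos c2, ← hds]
      exact ih (i + 1) j (by omega)
    rw [if_neg c2, if_neg c2]
    by_cases c3 : p[i] = '*' ∧ j + 1 = s.length
    · rw [if_pos c3, if_pos (by
        simp only [Bool.and_eq_true, decide_eq_true_eq, List.isEmpty_iff]
        exact ⟨c3.1, List.drop_eq_nil_of_le (by omega)⟩), ← hds]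
      exact ih (i + 1) j (by omega)
    have e3 : ¬ ((decide (p[i] = '*') && (s.drop (j + 1)).isEmpty) = true) := by
      simp only [Bool.and_eq_true, decide_eq_true_eq, List.isEmpty_iff, List.drop_eq_nil_iff]
      intro h
      exact c3 ⟨h.1, by omega⟩
    rw [if_neg c3, if_neg e3]
    by_cases c4 : (p[i] = '*' ∨ p[i] = '+') ∧ j + 2 ≤ s.length ∧ s[j] = s[j + 1]!
    · have hjs1 : j + 1 < s.length := by omega
      have hds1 : s.drop (j + 1) = s[j + 1] :: s.drop (j + 2) :=
        (List.getElem_cons_drop hjs1).symm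
      have hse1 : s[j + 1]! = s[j + 1] := getElem!_pos s (j + 1) hjs1
      rw [if_pos c4, if_pos (by
        rw [hds1]
        simp only [Bool.and_eq_true, Bool.or_eq_true, decide_eq_true_eq]
        exact ⟨c4.1, by rw [← hse1]; exact c4.2.2⟩)]
      rw [hds1, List.drop_one, List.tail_cons, ← hdp]
      exact ih i (j + 2) (by omega)
    have e4 : ¬ (((decide (p[i] = '*') || decide (p[i] = '+')) &&
        (match s.drop (j + 1) with | s1 :: _ => decide (s[j] = s1) | [] => false)) = true) := by
      cases hdd : s.drop (j + 1) with
      | nil => simp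
      | cons c cs =>
        have hlen : j + 1 < s.length := by
          by_contra hc
          rw [List.drop_eq_nil_of_le (by omega)] at hdd
          exact absurd hdd (by simp)
        have hc' : c = s[j + 1] := by
          have h' := (List.getElem_cons_drop hlen).symm
          rw [hdd] at h'
          exact (List.cons.injEq _ _ _ _ ▸ h').1
        simp only [Bool.and_eq_true, Bool.or_eq_true, decide_eq_true_eq]
        intro h
        exact c4 ⟨h.1, by omega, by
          rw [getElem!_pos s (j + 1) hlen, ← hc']; exact h.2⟩
    rw [if_neg c4, if_neg e4]
    by_cases c5 : i + 2 ≤ p.length ∧ (p[i + 1]! = '?' ∨ p[i + 1]! = '*' ∨ p[i] = '+')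
    · have hip1 : i + 1 < p.length := by omega
      have hdp1 : p.drop (i + 1) = p[i + 1] :: p.drop (i + 2) :=
        (List.getElem_cons_drop hip1).symm
      have hpe1 : p[i + 1]! = p[i + 1] := getElem!_pos p (i + 1) hip1
      rw [if_pos c5, if_pos (by
        rw [hdp1]
        simp only [ne_eq, reduceCtorEq, not_false_eq_true, decide_true, Bool.true_and,
          List.head?_cons, Bool.or_eq_true, decide_eq_true_eq, Option.some.injEq]
        rw [← hpe1]
        tauto)]
      rw [hdp1, List.drop_one, List.tail_cons, ← hds]
      exact ih (i + 2) j (by omega)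
    have e5 : ¬ ((decide (p.drop (i + 1) ≠ []) &&
        (decide ((p.drop (i + 1)).head? = some '?') || decide ((p.drop (i + 1)).head? = some '*')
          || decide (p[i] = '+'))) = true) := by
      cases hdd : p.drop (i + 1) with
      | nil => simp
      | cons c cs =>
        have hlen : i + 1 < p.length := by
          by_contra hc
          rw [List.drop_eq_nil_of_le (by omega)] at hdd
          exact absurd hdd (by simp)
        have hc' : c = p[i + 1] := by
          have h' := (List.getElem_cons_drop hlen).symm
          rw [hdd] at h'
          exact (List.cons.injEq _ _ _ _ ▸ h').1
        simp only [List.head?_cons, Bool.and_eq_true, Bool.or_eq_true, decide_eq_true_eq,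
          Option.some.injEq, ne_eq, reduceCtorEq, not_false_eq_true, decide_true,
          Bool.true_and]
        intro h
        refine c5 ⟨by omega, ?_⟩
        rw [getElem!_pos p (i + 1) hlen, ← hc']
        tauto
    rw [if_neg c5, if_neg e5]

theorem matchAt_eq (p s : List Char) (i j : Nat) :
    matchAt p s i j = engineA (p.drop i) (s.drop j) :=
  matchAt_eq_aux p s (p.length - i + (s.length - j)) i j le_rfl

theorem takeWhile_append_cons (pattern input : List Char) (hp : '|' ∉ pattern) :
    (pattern ++ '|' :: input).takeWhile (· ≠ '|') = pattern := by
  induction pattern with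
  | nil => simp
  | cons c cs ih =>
    simp only [List.mem_cons, not_or] at hp
    rw [List.cons_append, List.takeWhile_cons, if_pos (by simp; exact fun e => hp.1 e.symm), ih hp.2]

theorem dropWhile_append_cons (pattern input : List Char) (hp : '|' ∉ pattern) :
    (pattern ++ '|' :: input).dropWhile (· ≠ '|') = '|' :: input := by
  induction pattern with
  | nil => simp
  | cons c cs ih =>
    simp only [List.mem_cons, not_or] at hp
    rw [List.cons_append, List.dropWhile_cons, if_pos (by simp; exact fun e => hp.1 e.symm), ih hp.2]

theorem count_append_cons (pattern input : List Char) (hp : '|' ∉ pattern) (hi : '|' ∉ input) :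
    (pattern ++ '|' :: input).count '|' = 1 := by
  simp [List.count_append, List.count_eq_zero.mpr hp, List.count_eq_zero.mpr hi]

theorem splitPat_append (pattern input : List Char) (hp : '|' ∉ pattern) :
    splitPat (pattern ++ '|' :: input) = pattern := by
  simpa [splitPat] using takeWhile_append_cons pattern input hp

theorem splitInp_append (pattern input : List Char) (hp : '|' ∉ pattern) :
    splitInp (pattern ++ '|' :: input) = input := by
  unfold splitInp
  rw [dropWhile_append_cons pattern input hp, List.tail_cons]

-- A's recursion over reconstructed raw strings equals the suffix loop (unanchored case)
theorem regexA_eq_loopB (input pattern : List Char) (hp : '|' ∉ pattern) (hi : '|' ∉ input)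
    (hh : pattern.head? ≠ some '^') :
    regexA (pattern ++ '|' :: input) = loopB pattern false input := by
  have hanch : anchOf (pattern ++ '|' :: input) = false := by
    simp [anchOf, splitPat_append pattern input hp, hh]
  have hpat : patOf (pattern ++ '|' :: input) = pattern := by
    simp [patOf, hanch, splitPat_append pattern input hp]
  induction input with
  | nil =>
    rw [regexA, loopB]
    simp [count_append_cons pattern [] hp (by simp), hpat, hanch,
      splitInp_append pattern [] hp]
  | cons c cs ih =>
    simp only [List.mem_cons, not_or] at hi
    have hanch' : anchOf (pattern ++ '|' :: cs) = false := by
      simp [anchOf, splitPat_append pattern cs hp, hh]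
    have hpat' : patOf (pattern ++ '|' :: cs) = pattern := by
      simp [patOf, hanch', splitPat_append pattern cs hp]
    rw [regexA, loopB]
    rw [dif_pos (count_append_cons pattern (c :: cs) hp (by simp [hi.1, hi.2]))]
    rw [hpat, hanch, splitInp_append pattern (c :: cs) hp]
    split
    · rfl
    · simpa using ih hi.2 hanch' hpat'

-- A equals the suffix loop on every input with exactly one separator
theorem regexA_eq_loop (raw : List Char) (h : raw.count '|' = 1) :
    regexA raw = loopB (patOf raw) (anchOf raw) (splitInp raw) := by
  have hmem : '|' ∈ raw := by
    by_contra hc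
    have := List.count_eq_zero.mpr hc
    omega
  have hptw : '|' ∉ splitPat raw := by
    intro hm
    have := List.mem_takeWhile_imp hm
    simp at this
  have hdw : raw.dropWhile (· ≠ '|') ≠ [] := by
    intro hnil
    have heq := List.takeWhile_append_dropWhile (p := (· ≠ '|')) (l := raw)
    rw [hnil, List.append_nil] at heq
    exact hptw (by rw [splitPat, heq]; exact hmem)
  obtain ⟨rest, hd⟩ : ∃ rest, raw.dropWhile (· ≠ '|') = '|' :: rest := by
    cases hdd : raw.dropWhile (· ≠ '|') with
    | nil => exact absurd hdd hdw
    | cons c cs =>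
      have : ¬ (c ≠ '|') := by
        have := List.head?_dropWhile_not (p := (· ≠ '|')) (l := raw)
        rw [hdd] at this; simpa using this
      exact ⟨cs, by simp_all⟩
  have hrest : '|' ∉ rest := by
    have hcnt : raw.count '|' =
        (raw.takeWhile (· ≠ '|')).count '|' + (raw.dropWhile (· ≠ '|')).count '|' := by
      conv_lhs => rw [← List.takeWhile_append_dropWhile (p := (· ≠ '|')) (l := raw)]
      rw [List.count_append]
    rw [hd, h] at hcnt
    have hzero : (raw.takeWhile (· ≠ '|')).count '|' = 0 := List.count_eq_zero.mpr hptw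
    rw [hzero, List.count_cons] at hcnt
    simp at hcnt
    intro hm
    have := List.count_pos_iff.mpr hm
    omega
  have hinp : splitInp raw = rest := by rw [splitInp, hd, List.tail_cons]
  rw [regexA, dif_pos h]
  by_cases hanch : anchOf raw = true
  · rw [loopB, hanch]
    split
    · rfl
    · simp
  · simp only [Bool.not_eq_true] at hanch
    rw [loopB, hanch]
    split
    · rfl
    · rw [hinp]
      cases rest with
      | nil => simp
      | cons c cs =>
        simp only [ne_eq, reduceCtorEq, not_false_eq_true, decide_true, Bool.not_false,
          Bool.and_self, if_pos, List.tail_cons]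
        have hcs : '|' ∉ cs := fun hm => hrest (List.mem_cons_of_mem _ hm)
        have hpat : patOf raw = splitPat raw := by rw [patOf, hanch]; simp
        have hhd : (splitPat raw).head? ≠ some '^' := by
          rw [anchOf] at hanch; simpa using hanch
        rw [hpat]
        exact regexA_eq_loopB cs (splitPat raw) hptw hcs hhd

-- B's any-over-offsets equals the suffix loop
theorem any_range_eq_loopB (p s : List Char) :
    (List.range (s.length + 1)).any (fun k => engineA p (s.drop k)) = loopB p false s := by
  induction s with
  | nil =>
    rw [loopB]
    cases he : engineA p [] <;> simp [he]
  | cons c cs ih =>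
    rw [loopB]
    have hr : List.range (cs.length + 1 + 1) = 0 :: (List.range (cs.length + 1)).map (· + 1) := by
      rw [List.range_succ_eq_map]
    rw [List.length_cons, hr, List.any_cons, List.any_map]
    have hcomp : ((fun k => engineA p ((c :: cs).drop k)) ∘ (· + 1)) =
        (fun k => engineA p (cs.drop k)) := by
      funext k; rfl
    rw [hcomp, ih]
    cases he : engineA p (c :: cs) <;> simp [he]

-- anchored: the loop stops after one engine call
theorem loopB_true (p s : List Char) : loopB p true s = engineA p s := by
  rw [loopB]
  split <;> simp_all

theorem anchB_eq (raw : List Char) : anchB (splitPat raw) = anchOf raw := by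
  rw [anchB, anchOf]
  cases splitPat raw with
  | nil => simp
  | cons c cs =>
    simp only [List.take_succ_cons, List.take_zero, List.head?_cons]
    by_cases hc : c = '^' <;> simp [hc]

theorem regexA_eq_regexB (raw : List Char) (h : raw.count '|' = 1) : regexA raw = regexB raw := by
  rw [regexA_eq_loop raw h, regexB, if_pos h]
  by_cases hanch : anchOf raw = true
  · have hB : anchB (splitPat raw) = true := by rw [anchB_eq raw]; exact hanch
    rw [hanch, loopB_true]
    simp only [hB, if_true, List.range_one, List.any_cons, List.any_nil, Bool.or_false]
    rw [matchAt_eq, List.drop_zero, List.drop_zero]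
    congr 1
    rw [patOf, if_pos hanch]
    cases splitPat raw <;> simp
  · simp only [Bool.not_eq_true] at hanch
    have hB : anchB (splitPat raw) = false := by rw [anchB_eq raw]; exact hanch
    have hpat : patOf raw = splitPat raw := by rw [patOf, hanch]; simp
    rw [hanch, ← any_range_eq_loopB, hpat]
    simp only [hB, Bool.false_eq_true, if_false]
    congr 1
    funext k
    rw [matchAt_eq, List.drop_zero]

-- ===== VERDICT (by name: the statement is the Claim_ definition above) =====
theorem regex_engine_spec : Claim_equal_regex_engine := by
  intro raw _ hpre
  unfold Spec_regex_engine regex_engine regex_engine_alt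
  exact regexA_eq_regexB raw.toList hpre
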